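-- pv_equiv track=rewrite | github.com/ioerger/transit2 | src/pytransit/tnseq_tools.py | runs_w_info
-- ===== SOURCE A (Python) =====
-- def runs_w_info(data):
--     """Return list of all the runs of consecutive non-insertions with the start and end locations.
--
--     Arguments:
--         data (list): List of numeric data to check for runs.
--
--     Returns:
--         list: List of dictionary from run to length and position information of the tun.
--     """
--     runs = []
--     start = 1
--     current_r = 0
--     for read in data:
--         if read > 0:  # If ending a run of zeros
--             if current_r > 0:  # If we were in a run, add to list
--                 end = start + current_r - 1
--                 runs.append(dict(length=current_r, start=start, end=end))
--             start = start + (current_r + 1)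
--             current_r = 0
--         else:
--             current_r += 1
--
--     # If we ended in a run, add it
--     if current_r > 0:
--         end = start + current_r - 1
--         runs.append(dict(length=current_r, start=start, end=end))
--     return runs
-- ===== SOURCE B (Python) =====
-- def runs_w_info(data):
--     """Return list of all the runs of consecutive non-insertions with the start and end locations."""
--     runs = []
--     n = len(data)
--     i = 0
--     while i < n:
--         if data[i] > 0:
--             j = i + 1
--             while j < n and data[j] > 0:
--                 j += 1
--         else:
--             j = i + 1
--             while j < n and data[j] <= 0:
--                 j += 1
--             runs.append(dict(length=j - i, start=i + 1, end=j))
--         i = j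
--     return runs
-- ===== Notes on version B (the rewrite author's own statement) =====
-- stated objective: alternative
-- what changed: Replaces A's element-at-a-time counter loop (start/current_r state plus a trailing flush) with a two-pointer block scanner: an outer index loop that jumps over each maximal positive / non-positive block with an inner scan and emits one record per non-positive block directly from its start and end indices, with no pending-run state or final flush.
import Mathlib
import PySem

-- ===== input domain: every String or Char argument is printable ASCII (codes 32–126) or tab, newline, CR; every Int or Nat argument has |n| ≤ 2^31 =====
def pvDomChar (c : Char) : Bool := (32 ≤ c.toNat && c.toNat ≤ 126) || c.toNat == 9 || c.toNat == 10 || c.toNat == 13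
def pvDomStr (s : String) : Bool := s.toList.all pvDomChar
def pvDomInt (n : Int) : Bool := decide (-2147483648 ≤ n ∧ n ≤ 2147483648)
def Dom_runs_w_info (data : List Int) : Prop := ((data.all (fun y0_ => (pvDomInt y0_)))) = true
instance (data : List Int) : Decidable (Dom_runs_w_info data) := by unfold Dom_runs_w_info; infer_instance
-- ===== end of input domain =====

-- B replaces A's per-element counter loop (pending-run state plus trailing flush) with a
-- two-pointer scanner that jumps over maximal positive / non-positive blocks by index and
-- emits each record from the block's start and end indices; same O(n) cost, different shape.

-- ===== PORT A =====
-- A: fold over data with state (runs, start, current_r); flush the pending run after the loop.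
def runs_w_info (data : List Int) : List (List (String × Int)) :=
  let st := data.foldl
    (fun (st : List (List (String × Int)) × Int × Int) read =>
      let runs := st.1
      let start := st.2.1
      let current_r := st.2.2
      if read > 0 then
        if current_r > 0 then
          (runs ++ [[("length", current_r), ("start", start), ("end", start + current_r - 1)]],
           start + (current_r + 1), 0)
        else
          (runs, start + (current_r + 1), 0)
      else
        (runs, start, current_r + 1))
    ([], 1, 0)
  if st.2.2 > 0 then
    st.1 ++ [[("length", st.2.2), ("start", st.2.1), ("end", st.2.1 + st.2.2 - 1)]]
  else
    st.1

-- ===== PORT B =====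
-- B's inner loop: 'while j < n and pred(data[j]): j += 1' — first index ≥ j failing pred (or n).
def pySpanEnd (data : List Int) (p : Int → Bool) (j : Nat) : Nat :=
  if h : j < data.length then
    if p (data[j]'h) then pySpanEnd data p (j + 1) else j
  else j
  termination_by data.length - j
  decreasing_by omega

theorem pySpanEnd_ge (data : List Int) (p : Int → Bool) :
    ∀ (k j : Nat), data.length - j ≤ k → j ≤ pySpanEnd data p j := by
  intro k
  induction k with
  | zero =>
    intro j hj
    rw [pySpanEnd]
    have : ¬ j < data.length := by omega
    simp [this]
  | succ k ih =>
    intro j hj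
    rw [pySpanEnd]
    by_cases h : j < data.length
    · simp only [dif_pos h]
      by_cases hp : p (data[j]'h) = true
      · simp only [hp, if_pos]
        have := ih (j + 1) (by omega)
        omega
      · simp [hp]
    · simp [h]

-- B's outer while loop over the index i.
def runs_w_info_alt_go (data : List Int) (i : Nat) : List (List (String × Int)) :=
  if h : i < data.length then
    if (data[i]'h) > 0 then
      runs_w_info_alt_go data (pySpanEnd data (fun y => decide (y > 0)) (i + 1))
    else
      let j := pySpanEnd data (fun y => decide (y ≤ 0)) (i + 1)
      [("length", (j : Int) - (i : Int)), ("start", (i : Int) + 1), ("end", (j : Int))] ::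
        runs_w_info_alt_go data j
  else []
  termination_by data.length - i
  decreasing_by
  · have := pySpanEnd_ge data (fun y => decide (y > 0)) (data.length - (i + 1)) (i + 1) (le_refl _)
    omega
  · have := pySpanEnd_ge data (fun y => decide (y ≤ 0)) (data.length - (i + 1)) (i + 1) (le_refl _)
    omega

def runs_w_info_alt (data : List Int) : List (List (String × Int)) :=
  runs_w_info_alt_go data 0

-- ===== PRECONDITION & SPEC =====
def Spec_runs_w_info (data : List Int) (out : List (List (String × Int))) : Prop := out = runs_w_info_alt data
instance (data : List Int) (out : List (List (String × Int))) : Decidable (Spec_runs_w_info data out) := by unfold Spec_runs_w_info; infer_instance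

-- ===== CLAIM (what is proved, stated in full; the proofs are below) =====
def Claim_equal_runs_w_info : Prop := ∀ (data : List Int), Dom_runs_w_info data → Spec_runs_w_info data (runs_w_info data)

-- ===== LEMMAS AND PROOFS =====

-- list-level span (proof intermediary): longest prefix satisfying p, and the remainder
def pySpan (p : Int → Bool) : List Int → List Int × List Int
  | [] => ([], [])
  | x :: t =>
    if p x then
      let s := pySpan p t
      (x :: s.1, s.2)
    else
      ([], x :: t)

-- A's loop written as structural recursion on the list (proof intermediary).
def aRec (start cur : Int) : List Int → List (List (String × Int))
  | [] =>
    if cur > 0 then [[("length", cur), ("start", start), ("end", start + cur - 1)]] else []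
  | x :: t =>
    if x > 0 then
      if cur > 0 then
        [("length", cur), ("start", start), ("end", start + cur - 1)] :: aRec (start + (cur + 1)) 0 t
      else
        aRec (start + (cur + 1)) 0 t
    else
      aRec start (cur + 1) t

theorem runs_w_info_eq_aRec_aux (rest : List Int) :
    ∀ (runs : List (List (String × Int))) (start cur : Int),
      (let st := rest.foldl
        (fun (st : List (List (String × Int)) × Int × Int) read =>
          let runs := st.1
          let start := st.2.1
          let current_r := st.2.2
          if read > 0 then
            if current_r > 0 then
              (runs ++ [[("length", current_r), ("start", start), ("end", start + current_r - 1)]],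
               start + (current_r + 1), 0)
            else
              (runs, start + (current_r + 1), 0)
          else
            (runs, start, current_r + 1))
        (runs, start, cur)
       if st.2.2 > 0 then
         st.1 ++ [[("length", st.2.2), ("start", st.2.1), ("end", st.2.1 + st.2.2 - 1)]]
       else
         st.1) = runs ++ aRec start cur rest := by
  induction rest with
  | nil =>
    intro runs start cur
    simp only [List.foldl_nil, aRec]
    split <;> simp
  | cons x t ih =>
    intro runs start cur
    simp only [List.foldl_cons, aRec]
    by_cases hx : x > 0
    · by_cases hc : cur > 0
      · simp only [hx, hc, if_pos]
        rw [ih]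
        simp
      · simp only [hx, hc, if_pos]
        rw [ih]
        simp
    · simp only [if_neg hx]
      rw [ih]

theorem runs_w_info_eq_aRec (data : List Int) : runs_w_info data = aRec 1 0 data := by
  have h := runs_w_info_eq_aRec_aux data [] 1 0
  simpa [runs_w_info] using h

-- skipping a maximal positive block leaves aRec (with no pending run) at the advanced position
theorem aRec_skip_pos (l : List Int) : ∀ (pos : Int),
    aRec pos 0 l =
      aRec (pos + ((pySpan (fun y => decide (y > 0)) l).1.length : Int)) 0
        (pySpan (fun y => decide (y > 0)) l).2 := by
  induction l with
  | nil => intro pos; simp [pySpan]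
  | cons x t ih =>
    intro pos
    by_cases hx : x > 0
    · have h1 : aRec pos 0 (x :: t) = aRec (pos + 1) 0 t := by
        simp [aRec, hx]
      have h2 : pySpan (fun y => decide (y > 0)) (x :: t)
          = (x :: (pySpan (fun y => decide (y > 0)) t).1, (pySpan (fun y => decide (y > 0)) t).2) := by
        simp [pySpan, hx]
      rw [h1, ih, h2]
      congr 1
      simp only [List.length_cons]
      push_cast
      ring
    · simp [pySpan, hx]

-- absorbing a maximal non-positive block into the pending-run counter
theorem aRec_absorb_run (l : List Int) : ∀ (pos cur : Int),
    aRec pos cur l =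
      aRec pos (cur + ((pySpan (fun y => decide (y ≤ 0)) l).1.length : Int))
        (pySpan (fun y => decide (y ≤ 0)) l).2 := by
  induction l with
  | nil => intro pos cur; simp [pySpan]
  | cons x t ih =>
    intro pos cur
    by_cases hx : x ≤ 0
    · have hx' : ¬ x > 0 := by omega
      simp only [pySpan, hx, decide_true, if_pos, aRec, if_neg hx']
      rw [ih pos (cur + 1)]
      congr 1
      simp only [List.length_cons]
      push_cast
      ring
    · have hx' : x > 0 := by omega
      simp [pySpan, hx]

-- the remainder of a span is empty or starts with an element failing the predicate
theorem pySpan_snd_head (p : Int → Bool) (l : List Int) :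
    (pySpan p l).2 = [] ∨ ∃ y t, (pySpan p l).2 = y :: t ∧ p y = false := by
  induction l with
  | nil => left; simp [pySpan]
  | cons x t ih =>
    by_cases h : p x = true
    · simpa [pySpan, h] using ih
    · right
      exact ⟨x, t, by simp [pySpan, h], by simpa using h⟩

-- the remainder of a span is the drop of the prefix's length
theorem pySpan_snd_eq_drop (p : Int → Bool) (l : List Int) :
    (pySpan p l).2 = l.drop (pySpan p l).1.length := by
  induction l with
  | nil => simp [pySpan]
  | cons x t ih =>
    by_cases h : p x = true
    · simpa [pySpan, h] using ih
    · simp [pySpan, h]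

-- the index scanner computes start-index + length of the list-level span of the tail
theorem pySpanEnd_eq_span (data : List Int) (p : Int → Bool) :
    ∀ (k j : Nat), data.length - j ≤ k →
      pySpanEnd data p j = j + (pySpan p (data.drop j)).1.length := by
  intro k
  induction k with
  | zero =>
    intro j hj
    have hge : data.length ≤ j := by omega
    have h1 : ¬ j < data.length := by omega
    rw [pySpanEnd]
    simp [h1, List.drop_eq_nil_of_le hge, pySpan]
  | succ k ih =>
    intro j hj
    by_cases h : j < data.length
    · have hd : data.drop j = (data[j]'h) :: data.drop (j + 1) :=
        List.drop_eq_getElem_cons h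
      rw [pySpanEnd]
      by_cases hp : p (data[j]'h) = true
      · simp only [dif_pos h, hp, if_pos]
        rw [ih (j + 1) (by omega), hd]
        simp [pySpan, hp]
        all_goals omega
      · simp only [dif_pos h, hp]
        rw [hd]
        simp [pySpan, hp]
    · rw [pySpanEnd]
      have hge : data.length ≤ j := by omega
      simp [h, List.drop_eq_nil_of_le hge, pySpan]

-- main bridge: B's index scanner agrees with A's recursion at position i+1 on the suffix
theorem goB_eq_aRec (data : List Int) :
    ∀ (k i : Nat), data.length - i ≤ k →
      runs_w_info_alt_go data i = aRec ((i : Int) + 1) 0 (data.drop i) := by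
  intro k
  induction k with
  | zero =>
    intro i hi
    have h1 : ¬ i < data.length := by omega
    rw [runs_w_info_alt_go]
    simp [h1, List.drop_eq_nil_of_le (by omega : data.length ≤ i), aRec]
  | succ k ih =>
    intro i hi
    by_cases h : i < data.length
    · have hd : data.drop i = (data[i]'h) :: data.drop (i + 1) :=
        List.drop_eq_getElem_cons h
      rw [runs_w_info_alt_go]
      by_cases hx : (data[i]'h) > 0
      · -- positive block: both sides skip it
        simp only [dif_pos h, hx, if_pos]
        set j := pySpanEnd data (fun y => decide (y > 0)) (i + 1) with hjdef
        have hj : j = (i + 1) + (pySpan (fun y => decide (y > 0)) (data.drop (i + 1))).1.length :=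
          pySpanEnd_eq_span data (fun y => decide (y > 0)) (data.length - (i + 1)) (i + 1) (le_refl _)
        rw [ih j (by omega)]
        rw [aRec_skip_pos (data.drop i) ((i : Int) + 1)]
        have hspan : pySpan (fun y => decide (y > 0)) (data.drop i)
            = ((data[i]'h) :: (pySpan (fun y => decide (y > 0)) (data.drop (i + 1))).1,
               (pySpan (fun y => decide (y > 0)) (data.drop (i + 1))).2) := by
          rw [hd]; simp [pySpan, hx]
        rw [hspan]
        have hdrop : (pySpan (fun y => decide (y > 0)) (data.drop (i + 1))).2 = data.drop j := by
          rw [pySpan_snd_eq_drop, List.drop_drop, hj]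
          try (congr 1; omega)
        rw [hdrop]
        congr 1
        simp only [List.length_cons]
        push_cast [hj]
        ring
      · -- non-positive block: B emits one record, A absorbs the block then flushes at its end
        simp only [dif_pos h, if_neg hx]
        set j := pySpanEnd data (fun y => decide (y ≤ 0)) (i + 1) with hjdef
        have hj : j = (i + 1) + (pySpan (fun y => decide (y ≤ 0)) (data.drop (i + 1))).1.length :=
          pySpanEnd_eq_span data (fun y => decide (y ≤ 0)) (data.length - (i + 1)) (i + 1) (le_refl _)
        have hij : i < j := by omega
        have hx0 : (data[i]'h) ≤ 0 := by omega
        have hspan : pySpan (fun y => decide (y ≤ 0)) (data.drop i)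
            = ((data[i]'h) :: (pySpan (fun y => decide (y ≤ 0)) (data.drop (i + 1))).1,
               (pySpan (fun y => decide (y ≤ 0)) (data.drop (i + 1))).2) := by
          rw [hd]; simp [pySpan, hx0]
        have hdrop : (pySpan (fun y => decide (y ≤ 0)) (data.drop i)).2 = data.drop j := by
          rw [pySpan_snd_eq_drop, hspan, hd]
          simp only [List.length_cons, List.drop_succ_cons]
          rw [List.drop_drop]
          congr 1
          omega
        have hlen : ((pySpan (fun y => decide (y ≤ 0)) (data.drop i)).1.length : Int)
            = (j : Int) - (i : Int) := by
          rw [hspan]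
          simp only [List.length_cons]
          push_cast [hj]
          ring
        rw [ih j (by omega)]
        rw [aRec_absorb_run (data.drop i) ((i : Int) + 1) 0, hdrop, hlen]
        simp only [zero_add]
        rcases pySpan_snd_head (fun y => decide (y ≤ 0)) (data.drop i) with h2 | ⟨y, t2, h2, hy⟩
        · -- remainder empty: the run reaches the end of the list
          rw [hdrop] at h2
          rw [h2]
          have hA : aRec ((i : Int) + 1) ((j : Int) - (i : Int)) ([] : List Int)
              = [[("length", (j : Int) - (i : Int)), ("start", (i : Int) + 1), ("end", (j : Int))]] := by
            rw [aRec, if_pos (show (j : Int) - (i : Int) > 0 by omega)]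
            rw [show (i : Int) + 1 + ((j : Int) - (i : Int)) - 1 = (j : Int) by ring]
          have hB : aRec ((j : Int) + 1) 0 ([] : List Int) = [] := by simp [aRec]
          rw [hA, hB]
        · -- remainder starts with a positive element: A flushes the run there
          rw [hdrop] at h2
          have hypos : y > 0 := by simpa using hy
          rw [h2]
          have hA : aRec ((i : Int) + 1) ((j : Int) - (i : Int)) (y :: t2)
              = [("length", (j : Int) - (i : Int)), ("start", (i : Int) + 1), ("end", (j : Int))] ::
                  aRec ((j : Int) + 1 + 1) 0 t2 := by
            rw [aRec, if_pos hypos, if_pos (show (j : Int) - (i : Int) > 0 by omega)]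
            rw [show (i : Int) + 1 + ((j : Int) - (i : Int)) - 1 = (j : Int) by ring]
            rw [show (i : Int) + 1 + ((j : Int) - (i : Int) + 1) = (j : Int) + 1 + 1 by ring]
          have hB : aRec ((j : Int) + 1) 0 (y :: t2) = aRec ((j : Int) + 1 + (0 + 1)) 0 t2 := by
            rw [aRec, if_pos hypos, if_neg (show ¬ (0 : Int) > 0 by omega)]
          rw [hA, hB]
          rw [show (j : Int) + 1 + (0 + 1) = (j : Int) + 1 + 1 by ring]
    · rw [runs_w_info_alt_go]
      simp [h, List.drop_eq_nil_of_le (by omega : data.length ≤ i), aRec]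

-- ===== VERDICT (by name: the statement is the Claim_ definition above) =====
theorem runs_w_info_spec : Claim_equal_runs_w_info := by
  intro data _
  show runs_w_info data = runs_w_info_alt data
  rw [runs_w_info_eq_aRec, runs_w_info_alt,
    goB_eq_aRec data data.length 0 (by omega)]
  simp
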